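-- pv_equiv track=rewrite | github.com/kevin-v96/codesignal-arcade | Core/27. magicalWell.py | solution
-- ===== SOURCE A (Python) =====
-- def solution(a, b, n):
--     money = 0
--     while n:
--         money += a * b
--         a += 1
--         b += 1
--         n -= 1
--     return money
-- ===== SOURCE B (Python) =====
-- def solution(a, b, n):
--     # closed form: sum_{k=0}^{n-1} (a+k)(b+k)
--     return n * a * b + (a + b) * (n * (n - 1) // 2) + n * (n - 1) * (2 * n - 1) // 6
-- ===== Notes on version B (the rewrite author's own statement) =====
-- stated objective: faster
-- what changed: Replaced the n-iteration accumulation loop with the closed-form polynomial n*a*b + (a+b)*n(n-1)/2 + n(n-1)(2n-1)/6 using the sum-of-k and sum-of-k^2 formulas.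
import Mathlib
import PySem

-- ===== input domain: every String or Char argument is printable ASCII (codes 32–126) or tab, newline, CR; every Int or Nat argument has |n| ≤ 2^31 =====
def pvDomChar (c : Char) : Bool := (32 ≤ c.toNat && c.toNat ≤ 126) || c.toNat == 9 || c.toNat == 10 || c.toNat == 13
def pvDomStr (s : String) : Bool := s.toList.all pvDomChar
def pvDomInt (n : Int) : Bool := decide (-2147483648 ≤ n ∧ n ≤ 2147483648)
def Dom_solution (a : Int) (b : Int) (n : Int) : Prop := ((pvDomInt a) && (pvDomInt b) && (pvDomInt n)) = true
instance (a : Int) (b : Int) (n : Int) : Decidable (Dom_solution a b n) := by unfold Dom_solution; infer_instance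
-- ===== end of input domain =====

-- B replaces A's n-iteration loop with the O(1) closed-form polynomial (faster, asymptotic).

-- ===== PORT A =====
-- A's while loop: runs while n ≠ 0, decrementing n each time; for n ≥ 0 this is n iterations.
-- (For n < 0 the Python loop never terminates, so Pre_ requires 0 ≤ n; fuel n.toNat is exact on Pre_.)
def solutionLoop : Nat → Int → Int → Int → Int
  | 0, _, _, money => money
  | k + 1, a, b, money => solutionLoop k (a + 1) (b + 1) (money + a * b)

def solution (a : Int) (b : Int) (n : Int) : Int := solutionLoop n.toNat a b 0

-- ===== PORT B =====
def solution_alt (a : Int) (b : Int) (n : Int) : Int :=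
  n * a * b + (a + b) * PySem.Int.floordiv (n * (n - 1)) 2
    + PySem.Int.floordiv (n * (n - 1) * (2 * n - 1)) 6

-- ===== PRECONDITION & SPEC =====
-- Pre_ excludes n < 0, on which Python A's while loop never terminates (it diverges, returning nothing).
def Pre_solution (a : Int) (b : Int) (n : Int) : Prop := 0 ≤ n
instance (a : Int) (b : Int) (n : Int) : Decidable (Pre_solution a b n) := by unfold Pre_solution; infer_instance
def pvWitness_solution : Int × Int × Int := (3, 5, 4)

def Spec_solution (a : Int) (b : Int) (n : Int) (out : Int) : Prop := out = solution_alt a b n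
instance (a : Int) (b : Int) (n : Int) (out : Int) : Decidable (Spec_solution a b n out) := by unfold Spec_solution; infer_instance

-- ===== CLAIM (what is proved, stated in full; the proofs are below) =====
def Claim_equal_solution : Prop := ∀ (a : Int) (b : Int) (n : Int), Dom_solution a b n → Pre_solution a b n → Spec_solution a b n (solution a b n)

-- ===== LEMMAS AND PROOFS =====

theorem solutionLoop_shift (k : Nat) : ∀ (a b m : Int),
    solutionLoop k a b m = m + solutionLoop k a b 0 := by
  induction k with
  | zero => intro a b m; simp [solutionLoop]
  | succ k ih =>
    intro a b m
    simp only [solutionLoop]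
    rw [ih (a+1) (b+1) (m + a*b), ih (a+1) (b+1) (0 + a*b)]
    ring

theorem solutionLoop_six (k : Nat) : ∀ (a b : Int),
    6 * solutionLoop k a b 0
      = 6 * (k : Int) * a * b + 3 * (a + b) * ((k : Int) * ((k : Int) - 1))
        + (k : Int) * ((k : Int) - 1) * (2 * (k : Int) - 1) := by
  induction k with
  | zero => intro a b; simp [solutionLoop]
  | succ k ih =>
    intro a b
    simp only [solutionLoop]
    rw [solutionLoop_shift]
    have h := ih (a + 1) (b + 1)
    push_cast
    push_cast at h
    linear_combination h

theorem solution_spec : Claim_equal_solution := by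
  intro a b n _ hn
  unfold Spec_solution solution solution_alt
  set k := n.toNat with hk
  have hnk : (k : Int) = n := Int.toNat_of_nonneg hn
  -- even part
  obtain ⟨p, hp⟩ : ∃ p, n * (n - 1) = 2 * p := by
    rcases Int.even_or_odd n with ⟨t, ht⟩ | ⟨t, ht⟩
    · exact ⟨t * (n - 1), by rw [ht]; ring⟩
    · exact ⟨n * t, by rw [ht]; ring⟩
  have h6 := solutionLoop_six k a b
  rw [hnk] at h6
  -- define q from the loop value so that the cubic part is 6*q
  set S := solutionLoop k a b 0 with hS
  obtain ⟨q, hq⟩ : ∃ q, n * (n - 1) * (2 * n - 1) = 6 * q := by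
    refine ⟨S - n * a * b - (a + b) * p, ?_⟩
    linear_combination -h6 - 3 * (a + b) * hp
  have hdp : PySem.Int.floordiv (n * (n - 1)) 2 = p := by
    rw [PySem.Int.floordiv_eq_ediv_of_pos (by norm_num), hp]
    exact Int.mul_ediv_cancel_left p (by norm_num)
  have hdq : PySem.Int.floordiv (n * (n - 1) * (2 * n - 1)) 6 = q := by
    rw [PySem.Int.floordiv_eq_ediv_of_pos (by norm_num), hq]
    exact Int.mul_ediv_cancel_left q (by norm_num)
  rw [hdp, hdq]
  have : 6 * S = 6 * (n * a * b + (a + b) * p + q) := by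
    linear_combination h6 + 3 * (a + b) * hp + hq
  have := mul_left_cancel₀ (by norm_num : (6:Int) ≠ 0) this
  linarith
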